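-- pv_equiv track=rewrite | github.com/yahshibu/nested-ner-tacl2020-transformers | util/evaluate.py | detail_count_overlap
-- ===== SOURCE A (Python) =====
-- from typing import List, Tuple
--
-- def detail_count_overlap(g_entities: List[List[Tuple[int, int, int]]], p_entities: List[List[Tuple[int, int, int]]]) \
--         -> Tuple[Tuple[int, int], Tuple[int, int], Tuple[int, int]]:
--     """
--     Counting the # of crossing structures
--     Naive way
--     """
--     num_all = 0
--     num_left = 0
--     num_right = 0
--     num_other = 0
--     c_num_left = 0
--     c_num_right = 0
--     c_num_other = 0
--
--     for ets, p_ets in zip(g_entities, p_entities):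
--         len_ets = len(ets)
--         if len_ets == 0:
--             continue
--         for i in range(len_ets-1):
--             num_all += 1
--             candidates = ets[i+1:]
--             focus = ets[i]
--             for cand in candidates:
--                 if cand[0] == focus[0] and cand[1] != focus[1] and cand[2] == focus[2]:
--                     num_left += 1
--                     if cand in p_ets and focus in p_ets:
--                         c_num_left += 1
--                 elif cand[1] == focus[1] and cand[0] != focus[0] and cand[2] == focus[2]:
--                     num_right += 1
--                     if cand in p_ets and focus in p_ets:
--                         c_num_right += 1
--                 else:
--                     num_other += 1
--                     if cand in p_ets and focus in p_ets:
--                         c_num_other += 1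
--     return (num_left, c_num_left), (num_right, c_num_right), (num_other, c_num_other)
-- ===== SOURCE B (Python) =====
-- from typing import List, Tuple
--
--
-- def _pair_counts(ets):
--     """One pass: running counters keyed by (col0,col2), (col1,col2) and the full
--     tuple give, for each element, the number of earlier partners of each kind.
--     Returns (#left pairs, #right pairs, #all pairs)."""
--     seen_ac = {}
--     seen_bc = {}
--     seen_abc = {}
--     left = right = total = 0
--     n = 0
--     for (a, b, c) in ets:
--         dup = seen_abc.get((a, b, c), 0)
--         left += seen_ac.get((a, c), 0) - dup
--         right += seen_bc.get((b, c), 0) - dup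
--         total += n
--         seen_ac[(a, c)] = seen_ac.get((a, c), 0) + 1
--         seen_bc[(b, c)] = seen_bc.get((b, c), 0) + 1
--         seen_abc[(a, b, c)] = dup + 1
--         n += 1
--     return left, right, total
--
--
-- def detail_count_overlap(g_entities: List[List[Tuple[int, int, int]]], p_entities: List[List[Tuple[int, int, int]]]) \
--         -> Tuple[Tuple[int, int], Tuple[int, int], Tuple[int, int]]:
--     """
--     Counting the # of crossing structures
--     Linear per sentence: hash counters instead of scanning all pairs
--     """
--     num_left = num_right = num_other = 0
--     c_num_left = c_num_right = c_num_other = 0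
--     for ets, p_ets in zip(g_entities, p_entities):
--         l, r, t = _pair_counts(ets)
--         num_left += l
--         num_right += r
--         num_other += t - l - r
--         pset = set(p_ets)
--         kept = [e for e in ets if e in pset]
--         cl, cr, ct = _pair_counts(kept)
--         c_num_left += cl
--         c_num_right += cr
--         c_num_other += ct - cl - cr
--     return (num_left, c_num_left), (num_right, c_num_right), (num_other, c_num_other)
-- ===== Notes on version B (the rewrite author's own statement) =====
-- stated objective: faster
-- what changed: Instead of scanning all candidate pairs per focus (with a linear 'in p_ets' scan per pair), B makes one pass per sentence keeping hash counters keyed by (col0,col2), (col1,col2) and the full tuple, counting left/right/other crossing pairs incrementally, and gets the matched counts by the same pass over the list filtered by a p_ets set.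
import Mathlib
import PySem

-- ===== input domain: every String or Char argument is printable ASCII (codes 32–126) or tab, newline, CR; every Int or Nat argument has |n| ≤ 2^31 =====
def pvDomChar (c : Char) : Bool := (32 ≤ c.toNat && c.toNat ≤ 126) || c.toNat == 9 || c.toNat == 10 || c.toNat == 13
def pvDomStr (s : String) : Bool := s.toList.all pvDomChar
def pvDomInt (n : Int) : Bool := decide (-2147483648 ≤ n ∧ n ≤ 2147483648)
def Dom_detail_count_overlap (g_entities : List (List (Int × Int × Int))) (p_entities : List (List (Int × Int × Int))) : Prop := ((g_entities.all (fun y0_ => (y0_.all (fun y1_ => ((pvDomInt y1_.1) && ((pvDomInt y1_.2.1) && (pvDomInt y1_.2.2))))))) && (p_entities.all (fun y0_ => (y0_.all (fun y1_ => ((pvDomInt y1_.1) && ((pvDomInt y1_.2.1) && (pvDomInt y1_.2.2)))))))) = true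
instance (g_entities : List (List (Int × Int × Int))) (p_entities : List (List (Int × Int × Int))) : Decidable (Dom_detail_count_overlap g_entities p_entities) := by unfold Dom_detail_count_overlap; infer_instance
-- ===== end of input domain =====

-- B replaces A's all-pairs scan (with linear list membership per pair) by one pass per
-- sentence over hash counters keyed by (col0,col2), (col1,col2) and the full tuple,
-- counting the crossing pairs incrementally; objective: faster (asymptotic).

abbrev PVT := Int × Int × Int
abbrev PVSt7 := Int × Int × Int × Int × Int × Int × Int

-- ===== PORT A =====
def innerBodyA (p_ets : List PVT) (focus : PVT) (st : PVSt7) (cand : PVT) : PVSt7 :=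
  match st with
  | (na, nl, nr, no, cl, cr, co) =>
    if cand.1 = focus.1 ∧ cand.2.1 ≠ focus.2.1 ∧ cand.2.2 = focus.2.2 then
      (na, nl + 1, nr, no, if cand ∈ p_ets ∧ focus ∈ p_ets then cl + 1 else cl, cr, co)
    else if cand.2.1 = focus.2.1 ∧ cand.1 ≠ focus.1 ∧ cand.2.2 = focus.2.2 then
      (na, nl, nr + 1, no, cl, if cand ∈ p_ets ∧ focus ∈ p_ets then cr + 1 else cr, co)
    else
      (na, nl, nr, no + 1, cl, cr, if cand ∈ p_ets ∧ focus ∈ p_ets then co + 1 else co)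

def outerBodyA (p_ets : List PVT) (ets : List PVT) (st : PVSt7) (i : Int) : PVSt7 :=
  match st with
  | (na, nl, nr, no, cl, cr, co) =>
    let st1 : PVSt7 := (na + 1, nl, nr, no, cl, cr, co)
    let candidates := PySem.List.slice ets (some (i + 1)) none
    let focus := PySem.List.pyGetD ets i (0, 0, 0)
    candidates.foldl (innerBodyA p_ets focus) st1

def sentLoopA (p_ets : List PVT) (ets : List PVT) (st : PVSt7) : PVSt7 :=
  let len_ets : Int := ets.length
  if len_ets = 0 then st
  else (PySem.List.pyRange 0 (len_ets - 1) 1).foldl (outerBodyA p_ets ets) st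

def detail_count_overlap (g_entities : List (List (Int × Int × Int))) (p_entities : List (List (Int × Int × Int))) : (Int × Int) × (Int × Int) × (Int × Int) :=
  let r := (g_entities.zip p_entities).foldl (fun st z => sentLoopA z.2 z.1 st) (0, 0, 0, 0, 0, 0, 0)
  match r with
  | (_na, nl, nr, no, cl, cr, co) => ((nl, cl), (nr, cr), (no, co))

-- ===== PORT B =====
abbrev PVStB := PySem.Dict (Int × Int) Int × PySem.Dict (Int × Int) Int × PySem.Dict PVT Int × Int × Int × Int × Int

def stepB (st : PVStB) (e : PVT) : PVStB :=
  match st, e with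
  | (sac, sbc, sabc, l, r, t, n), (a, b, c) =>
    let dup := sabc.getD (a, b, c) 0
    let l := l + (sac.getD (a, c) 0 - dup)
    let r := r + (sbc.getD (b, c) 0 - dup)
    let t := t + n
    (sac.insert (a, c) (sac.getD (a, c) 0 + 1),
     sbc.insert (b, c) (sbc.getD (b, c) 0 + 1),
     sabc.insert (a, b, c) (dup + 1), l, r, t, n + 1)

def pairCountsB (ets : List PVT) : Int × Int × Int :=
  let res := ets.foldl stepB
    ((PySem.Dict.empty : PySem.Dict (Int × Int) Int),
     (PySem.Dict.empty : PySem.Dict (Int × Int) Int),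
     (PySem.Dict.empty : PySem.Dict PVT Int), 0, 0, 0, 0)
  (res.2.2.2.1, res.2.2.2.2.1, res.2.2.2.2.2.1)

def stepAltB (st : Int × Int × Int × Int × Int × Int) (z : List PVT × List PVT) : Int × Int × Int × Int × Int × Int :=
  match st with
  | (nl, nr, no, cl, cr, co) =>
    let lrt := pairCountsB z.1
    let pset := PySem.Set.ofList z.2
    let kept := z.1.filter (fun e => decide (e ∈ pset))
    let clrt := pairCountsB kept
    (nl + lrt.1, nr + lrt.2.1, no + (lrt.2.2 - lrt.1 - lrt.2.1),
     cl + clrt.1, cr + clrt.2.1, co + (clrt.2.2 - clrt.1 - clrt.2.1))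

def detail_count_overlap_alt (g_entities : List (List (Int × Int × Int))) (p_entities : List (List (Int × Int × Int))) : (Int × Int) × (Int × Int) × (Int × Int) :=
  let r := (g_entities.zip p_entities).foldl stepAltB (0, 0, 0, 0, 0, 0)
  match r with
  | (nl, nr, no, cl, cr, co) => ((nl, cl), (nr, cr), (no, co))

-- ===== PRECONDITION & SPEC =====
def Spec_detail_count_overlap (g_entities : List (List (Int × Int × Int))) (p_entities : List (List (Int × Int × Int))) (out : (Int × Int) × (Int × Int) × (Int × Int)) : Prop := out = detail_count_overlap_alt g_entities p_entities
instance (g_entities : List (List (Int × Int × Int))) (p_entities : List (List (Int × Int × Int))) (out : (Int × Int) × (Int × Int) × (Int × Int)) : Decidable (Spec_detail_count_overlap g_entities p_entities out) := by unfold Spec_detail_count_overlap; infer_instance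

-- ===== CLAIM (what is proved, stated in full; the proofs are below) =====
def Claim_equal_detail_count_overlap : Prop := ∀ (g_entities : List (List (Int × Int × Int))) (p_entities : List (List (Int × Int × Int))), Dom_detail_count_overlap g_entities p_entities → Spec_detail_count_overlap g_entities p_entities (detail_count_overlap g_entities p_entities)

-- ===== LEMMAS AND PROOFS =====

-- canonical per-sentence pair counts
def pvKa (e : PVT) : Int × Int := (e.1, e.2.2)
def pvKb (e : PVT) : Int × Int := (e.2.1, e.2.2)

def pvPcnt {K : Type} [DecidableEq K] (f : PVT → K) : List PVT → Int
  | [] => 0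
  | x :: t => ((t.countP (fun y => decide (f y = f x)) : Nat) : Int) + pvPcnt f t

lemma pvPcnt_nil {K : Type} [DecidableEq K] (f : PVT → K) : pvPcnt f [] = 0 := rfl
lemma pvPcnt_cons {K : Type} [DecidableEq K] (f : PVT → K) (x : PVT) (t : List PVT) :
    pvPcnt f (x :: t) = ((t.countP (fun y => decide (f y = f x)) : Nat) : Int) + pvPcnt f t := rfl

def pvTp : List PVT → Int
  | [] => 0
  | _ :: t => ((t.length : Nat) : Int) + pvTp t

lemma pvTp_nil : pvTp [] = 0 := rfl
lemma pvTp_cons (x : PVT) (t : List PVT) : pvTp (x :: t) = ((t.length : Nat) : Int) + pvTp t := rfl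

def pvMemF (p_ets : List PVT) (e : PVT) : Bool := decide (e ∈ p_ets)
def pvKept (ets p_ets : List PVT) : List PVT := ets.filter (pvMemF p_ets)

def pvLs (ets : List PVT) : Int := pvPcnt pvKa ets - pvPcnt (fun e => e) ets
def pvRs (ets : List PVT) : Int := pvPcnt pvKb ets - pvPcnt (fun e => e) ets
def pvOs (ets : List PVT) : Int := pvTp ets - pvLs ets - pvRs ets

def pvLb (x y : PVT) : Bool := decide (y.1 = x.1 ∧ y.2.1 ≠ x.2.1 ∧ y.2.2 = x.2.2)
def pvRb (x y : PVT) : Bool := decide (y.2.1 = x.2.1 ∧ y.1 ≠ x.1 ∧ y.2.2 = x.2.2)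
def pvOb (x y : PVT) : Bool := !pvLb x y && !pvRb x y
def pvBoth (p_ets : List PVT) (x y : PVT) : Bool := decide (y ∈ p_ets ∧ x ∈ p_ets)

def pvSum : List (List PVT × List PVT) → PVSt7
  | [] => (0, 0, 0, 0, 0, 0, 0)
  | z :: zs =>
    let s := pvSum zs
    (s.1 + ((((z.1.length : Int) - 1).toNat : Nat) : Int), s.2.1 + pvLs z.1, s.2.2.1 + pvRs z.1,
     s.2.2.2.1 + pvOs z.1, s.2.2.2.2.1 + pvLs (pvKept z.1 z.2), s.2.2.2.2.2.1 + pvRs (pvKept z.1 z.2),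
     s.2.2.2.2.2.2 + pvOs (pvKept z.1 z.2))

-- pointwise countP splitting
lemma pvCountP_split {α : Type} (p q r : α → Bool)
    (h : ∀ y, ((if p y then 1 else 0) + (if q y then 1 else 0) : Nat) = if r y then 1 else 0)
    (t : List α) : t.countP p + t.countP q = t.countP r := by
  induction t with
  | nil => simp
  | cons y t ih =>
    simp only [List.countP_cons]
    have := h y
    omega

lemma pvCountP_split3 {α : Type} (p q r s : α → Bool)
    (h : ∀ y, ((if p y then 1 else 0) + (if q y then 1 else 0) + (if r y then 1 else 0) : Nat)
      = if s y then 1 else 0)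
    (t : List α) : t.countP p + t.countP q + t.countP r = t.countP s := by
  induction t with
  | nil => simp
  | cons y t ih =>
    simp only [List.countP_cons]
    have := h y
    omega

lemma pvCnt_L (x : PVT) (m : PVT → Bool) (t : List PVT) :
    t.countP (fun y => pvLb x y && m y) + t.countP (fun y => decide (y = x) && m y)
      = t.countP (fun y => decide (pvKa y = pvKa x) && m y) := by
  refine pvCountP_split _ _ _ (fun y => ?_) t
  by_cases h1 : y.1 = x.1 <;> by_cases h2 : y.2.1 = x.2.1 <;> by_cases h3 : y.2.2 = x.2.2 <;>
    by_cases hm : m y = true <;> simp [pvLb, pvKa, Prod.ext_iff, h1, h2, h3, hm]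

lemma pvCnt_R (x : PVT) (m : PVT → Bool) (t : List PVT) :
    t.countP (fun y => pvRb x y && m y) + t.countP (fun y => decide (y = x) && m y)
      = t.countP (fun y => decide (pvKb y = pvKb x) && m y) := by
  refine pvCountP_split _ _ _ (fun y => ?_) t
  by_cases h1 : y.1 = x.1 <;> by_cases h2 : y.2.1 = x.2.1 <;> by_cases h3 : y.2.2 = x.2.2 <;>
    by_cases hm : m y = true <;> simp [pvRb, pvKb, Prod.ext_iff, h1, h2, h3, hm]

lemma pvCnt_O (x : PVT) (m : PVT → Bool) (t : List PVT) :
    t.countP (fun y => pvOb x y && m y) + t.countP (fun y => pvLb x y && m y)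
      + t.countP (fun y => pvRb x y && m y) = t.countP m := by
  refine pvCountP_split3 _ _ _ _ (fun y => ?_) t
  by_cases h1 : y.1 = x.1 <;> by_cases h2 : y.2.1 = x.2.1 <;> by_cases h3 : y.2.2 = x.2.2 <;>
    by_cases hm : m y = true <;> simp [pvOb, pvLb, pvRb, h1, h2, h3, hm]

lemma pvCnt_L1 (x : PVT) (t : List PVT) :
    t.countP (pvLb x) + t.countP (fun y => decide (y = x))
      = t.countP (fun y => decide (pvKa y = pvKa x)) := by
  have h := pvCnt_L x (fun _ => true) t
  simpa using h

lemma pvCnt_R1 (x : PVT) (t : List PVT) :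
    t.countP (pvRb x) + t.countP (fun y => decide (y = x))
      = t.countP (fun y => decide (pvKb y = pvKb x)) := by
  have h := pvCnt_R x (fun _ => true) t
  simpa using h

lemma pvCnt_O1 (x : PVT) (t : List PVT) :
    t.countP (pvOb x) + t.countP (pvLb x) + t.countP (pvRb x) = t.length := by
  have h := pvCnt_O x (fun _ => true) t
  simpa using h

-- cons characterisations of the spec counts
lemma pvLs_cons (x : PVT) (t : List PVT) :
    pvLs (x :: t) = ((t.countP (pvLb x) : Nat) : Int) + pvLs t := by
  have h := pvCnt_L1 x t
  simp only [pvLs, pvPcnt_cons]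
  omega

lemma pvRs_cons (x : PVT) (t : List PVT) :
    pvRs (x :: t) = ((t.countP (pvRb x) : Nat) : Int) + pvRs t := by
  have h := pvCnt_R1 x t
  simp only [pvRs, pvPcnt_cons]
  omega

lemma pvOs_cons (x : PVT) (t : List PVT) :
    pvOs (x :: t) = ((t.countP (pvOb x) : Nat) : Int) + pvOs t := by
  have h := pvCnt_O1 x t
  have hl := pvCnt_L1 x t
  have hr := pvCnt_R1 x t
  simp only [pvOs, pvTp_cons, pvLs, pvRs, pvPcnt_cons]
  omega

lemma pvKept_cons (x : PVT) (t : List PVT) (p : List PVT) :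
    pvKept (x :: t) p = if x ∈ p then x :: pvKept t p else pvKept t p := by
  by_cases hx : x ∈ p <;> simp [pvKept, pvMemF, hx]

lemma pvCL_cons (x : PVT) (t : List PVT) (p : List PVT) :
    pvLs (pvKept (x :: t) p)
      = ((t.countP (fun y => pvLb x y && pvBoth p x y) : Nat) : Int) + pvLs (pvKept t p) := by
  by_cases hx : x ∈ p
  · rw [pvKept_cons, if_pos hx, pvLs_cons]
    congr 2
    rw [pvKept, List.countP_filter]
    exact (List.countP_congr (fun y _ => by simp [pvBoth, pvMemF, hx])).symm
  · rw [pvKept_cons, if_neg hx]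
    have : t.countP (fun y => pvLb x y && pvBoth p x y) = 0 := by
      simp [pvBoth, hx]
    omega

lemma pvCR_cons (x : PVT) (t : List PVT) (p : List PVT) :
    pvRs (pvKept (x :: t) p)
      = ((t.countP (fun y => pvRb x y && pvBoth p x y) : Nat) : Int) + pvRs (pvKept t p) := by
  by_cases hx : x ∈ p
  · rw [pvKept_cons, if_pos hx, pvRs_cons]
    congr 2
    rw [pvKept, List.countP_filter]
    exact (List.countP_congr (fun y _ => by simp [pvBoth, pvMemF, hx])).symm
  · rw [pvKept_cons, if_neg hx]
    have : t.countP (fun y => pvRb x y && pvBoth p x y) = 0 := by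
      simp [pvBoth, hx]
    omega

lemma pvCO_cons (x : PVT) (t : List PVT) (p : List PVT) :
    pvOs (pvKept (x :: t) p)
      = ((t.countP (fun y => pvOb x y && pvBoth p x y) : Nat) : Int) + pvOs (pvKept t p) := by
  by_cases hx : x ∈ p
  · rw [pvKept_cons, if_pos hx, pvOs_cons]
    congr 2
    rw [pvKept, List.countP_filter]
    exact (List.countP_congr (fun y _ => by simp [pvBoth, pvMemF, hx])).symm
  · rw [pvKept_cons, if_neg hx]
    have : t.countP (fun y => pvOb x y && pvBoth p x y) = 0 := by
      simp [pvBoth, hx]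
    omega

-- A side: the inner candidate loop
lemma innerA_spec (p : List PVT) (x : PVT) (cands : List PVT) :
    ∀ na nl nr no cl cr co : Int,
    cands.foldl (innerBodyA p x) (na, nl, nr, no, cl, cr, co) =
      (na,
       nl + ((cands.countP (pvLb x) : Nat) : Int),
       nr + ((cands.countP (pvRb x) : Nat) : Int),
       no + ((cands.countP (pvOb x) : Nat) : Int),
       cl + ((cands.countP (fun y => pvLb x y && pvBoth p x y) : Nat) : Int),
       cr + ((cands.countP (fun y => pvRb x y && pvBoth p x y) : Nat) : Int),
       co + ((cands.countP (fun y => pvOb x y && pvBoth p x y) : Nat) : Int)) := by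
  induction cands with
  | nil => intro na nl nr no cl cr co; simp
  | cons y t ih =>
    intro na nl nr no cl cr co
    rw [List.foldl_cons]
    by_cases h1 : y.1 = x.1 ∧ y.2.1 ≠ x.2.1 ∧ y.2.2 = x.2.2
    · have hL : pvLb x y = true := by simp only [pvLb, decide_eq_true_eq]; exact h1
      have hR : pvRb x y = false := by
        simp only [pvRb, decide_eq_false_iff_not]
        rintro ⟨hb, -, -⟩; exact h1.2.1 hb
      have hO : pvOb x y = false := by simp [pvOb, hL]
      by_cases hm : y ∈ p ∧ x ∈ p
      · have hB : pvBoth p x y = true := by simp [pvBoth, hm.1, hm.2]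
        simp only [innerBodyA, if_pos h1, if_pos hm]
        rw [ih]
        simp [hL, hR, hO, hB, Prod.mk.injEq]
        omega
      · have hB : pvBoth p x y = false := by
          simp only [pvBoth, decide_eq_false_iff_not]
          rintro ⟨hy, hx⟩; exact hm ⟨hy, hx⟩
        simp only [innerBodyA, if_pos h1, if_neg hm]
        rw [ih]
        simp [hL, hR, hO, hB, Prod.mk.injEq]
        omega
    · have hL : pvLb x y = false := by
        simp only [pvLb, decide_eq_false_iff_not]; exact h1
      by_cases h2 : y.2.1 = x.2.1 ∧ y.1 ≠ x.1 ∧ y.2.2 = x.2.2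
      · have hR : pvRb x y = true := by simp only [pvRb, decide_eq_true_eq]; exact h2
        have hO : pvOb x y = false := by simp [pvOb, hR]
        by_cases hm : y ∈ p ∧ x ∈ p
        · have hB : pvBoth p x y = true := by simp [pvBoth, hm.1, hm.2]
          simp only [innerBodyA, if_neg h1, if_pos h2, if_pos hm]
          rw [ih]
          simp [hL, hR, hO, hB, Prod.mk.injEq]
          omega
        · have hB : pvBoth p x y = false := by
            simp only [pvBoth, decide_eq_false_iff_not]
            rintro ⟨hy, hx⟩; exact hm ⟨hy, hx⟩
          simp only [innerBodyA, if_neg h1, if_pos h2, if_neg hm]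
          rw [ih]
          simp [hL, hR, hO, hB, Prod.mk.injEq]
          omega
      · have hR : pvRb x y = false := by
          simp only [pvRb, decide_eq_false_iff_not]; exact h2
        have hO : pvOb x y = true := by simp [pvOb, hL, hR]
        by_cases hm : y ∈ p ∧ x ∈ p
        · have hB : pvBoth p x y = true := by simp [pvBoth, hm.1, hm.2]
          simp only [innerBodyA, if_neg h1, if_neg h2, if_pos hm]
          rw [ih]
          simp [hL, hR, hO, hB, Prod.mk.injEq]
          omega
        · have hB : pvBoth p x y = false := by
            simp only [pvBoth, decide_eq_false_iff_not]
            rintro ⟨hy, hx⟩; exact hm ⟨hy, hx⟩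
          simp only [innerBodyA, if_neg h1, if_neg h2, if_neg hm]
          rw [ih]
          simp [hL, hR, hO, hB, Prod.mk.injEq]
          omega

-- A side: the outer index loop shifts down one position
lemma outerBodyA_shift (p : List PVT) (x : PVT) (t : List PVT) (acc : PVSt7) (i : Nat) :
    outerBodyA p (x :: t) acc ((i : Int) + 1) = outerBodyA p t acc (i : Int) := by
  obtain ⟨na, nl, nr, no, cl, cr, co⟩ := acc
  have e2 : ((i : Int) + 1 + 1) = (((i + 1 + 1 : Nat)) : Int) := by push_cast; ring
  have e1 : ((i : Int) + 1) = (((i + 1 : Nat)) : Int) := by push_cast; ring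
  simp only [outerBodyA]
  rw [e2, e1]
  rw [PySem.List.slice_from_natCast, PySem.List.slice_from_natCast,
    PySem.List.pyGetD_natCast, PySem.List.pyGetD_natCast]
  rw [List.drop_succ_cons, List.getD_cons_succ]

lemma rangeA_shift (p : List PVT) (x : PVT) (t : List PVT) (st : PVSt7) :
    (PySem.List.pyRange 1 ((t.length : Int)) 1).foldl (outerBodyA p (x :: t)) st
      = (PySem.List.pyRange 0 ((t.length : Int) - 1) 1).foldl (outerBodyA p t) st := by
  rw [PySem.List.pyRange_one, PySem.List.pyRange_one, List.foldl_map, List.foldl_map]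
  have hN : ((t.length : Int) - 1).toNat = ((t.length : Int) - 1 - 0).toNat := by omega
  rw [← hN]
  apply PySem.List.foldl_congr_mem
  intro acc k _
  have h1 : (1 : Int) + (k : Int) = (k : Int) + 1 := by ring
  have h0 : (0 : Int) + (k : Int) = (k : Int) := by ring
  rw [h1, h0, outerBodyA_shift]

-- A side: the whole per-sentence loop
lemma sentA_spec (p : List PVT) (ets : List PVT) :
    ∀ na nl nr no cl cr co : Int,
    sentLoopA p ets (na, nl, nr, no, cl, cr, co) =
      (na + ((((ets.length : Int) - 1).toNat : Nat) : Int),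
       nl + pvLs ets, nr + pvRs ets, no + pvOs ets,
       cl + pvLs (pvKept ets p), cr + pvRs (pvKept ets p), co + pvOs (pvKept ets p)) := by
  induction ets with
  | nil =>
    intro na nl nr no cl cr co
    simp [sentLoopA, pvLs, pvRs, pvOs, pvKept, pvPcnt_nil, pvTp_nil]
  | cons x t ih =>
    intro na nl nr no cl cr co
    match t with
    | [] =>
      have hL1 : pvLs [x] = 0 := by simp [pvLs, pvPcnt_cons, pvPcnt_nil]
      have hR1 : pvRs [x] = 0 := by simp [pvRs, pvPcnt_cons, pvPcnt_nil]
      have hO1 : pvOs [x] = 0 := by simp [pvOs, pvTp_cons, pvTp_nil, hL1, hR1]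
      have hk : pvKept [x] p = if x ∈ p then [x] else [] := by
        by_cases hx : x ∈ p <;> simp [pvKept, pvMemF, hx]
      have h1 : pvLs (pvKept [x] p) = 0 := by
        rw [hk]; by_cases hx : x ∈ p <;> simp [hx, pvLs, pvPcnt_cons, pvPcnt_nil]
      have h2 : pvRs (pvKept [x] p) = 0 := by
        rw [hk]; by_cases hx : x ∈ p <;> simp [hx, pvRs, pvPcnt_cons, pvPcnt_nil]
      have h3 : pvOs (pvKept [x] p) = 0 := by
        rw [pvOs, h1, h2, hk]
        by_cases hx : x ∈ p <;> simp [hx, pvTp_cons, pvTp_nil]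
      rw [sentLoopA]
      simp only [List.length_cons, List.length_nil]
      norm_num [hL1, hR1, hO1, h1, h2, h3]
    | z :: t' =>
      have hlen : (((x :: z :: t').length : Nat) : Int) ≠ 0 := by
        simp only [List.length_cons]; push_cast; omega
      have hpos : (0 : Int) < (((x :: z :: t').length : Nat) : Int) - 1 := by
        simp only [List.length_cons]; push_cast; omega
      rw [sentLoopA]
      simp only [if_neg hlen]
      rw [PySem.List.pyRange_one_cons hpos, List.foldl_cons]
      have hbody0 : outerBodyA p (x :: z :: t') (na, nl, nr, no, cl, cr, co) 0 =
          ((z :: t').foldl (innerBodyA p x) (na + 1, nl, nr, no, cl, cr, co)) := by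
        simp only [outerBodyA]
        norm_num [PySem.List.slice_from_one, PySem.List.pyGetD_zero_cons]
      rw [hbody0, innerA_spec]
      have hlen2 : (((x :: z :: t').length : Nat) : Int) - 1 = (((z :: t').length : Nat) : Int) := by
        simp only [List.length_cons]; push_cast; ring
      rw [hlen2]
      have h01 : (0 : Int) + 1 = 1 := by norm_num
      rw [h01, rangeA_shift]
      have hfold : ∀ st : PVSt7, (PySem.List.pyRange 0 ((((z :: t').length : Nat) : Int) - 1) 1).foldl
          (outerBodyA p (z :: t')) st = sentLoopA p (z :: t') st := by
        intro st
        rw [sentLoopA]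
        have : (((z :: t').length : Nat) : Int) ≠ 0 := by
          simp only [List.length_cons]; push_cast; omega
        simp only [if_neg this]
      rw [hfold, ih]
      rw [pvLs_cons x (z :: t'), pvRs_cons x (z :: t'), pvOs_cons x (z :: t'),
        pvCL_cons x (z :: t') p, pvCR_cons x (z :: t') p, pvCO_cons x (z :: t') p]
      simp only [Prod.mk.injEq, List.length_cons]
      push_cast
      refine ⟨by omega, by ring, by ring, by ring, by ring, by ring, by ring⟩

-- A side: the outer sentence loop
lemma outerA_spec (zs : List (List PVT × List PVT)) :
    ∀ na nl nr no cl cr co : Int,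
    zs.foldl (fun st z => sentLoopA z.2 z.1 st) (na, nl, nr, no, cl, cr, co) =
      (na + (pvSum zs).1, nl + (pvSum zs).2.1, nr + (pvSum zs).2.2.1, no + (pvSum zs).2.2.2.1,
       cl + (pvSum zs).2.2.2.2.1, cr + (pvSum zs).2.2.2.2.2.1, co + (pvSum zs).2.2.2.2.2.2) := by
  induction zs with
  | nil => intro na nl nr no cl cr co; simp [pvSum]
  | cons z zs ih =>
    intro na nl nr no cl cr co
    rw [List.foldl_cons, sentA_spec, ih]
    simp only [pvSum, Prod.mk.injEq]
    refine ⟨by ring, by ring, by ring, by ring, by ring, by ring, by ring⟩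

-- B side: counter dicts over a key function
def pvDictK {K : Type} [BEq K] (f : PVT → K) (pre : List PVT) : PySem.Dict K Int :=
  pre.foldl (fun d e => d.insert (f e) (d.getD (f e) 0 + 1)) PySem.Dict.empty

lemma pvDictK_eq {K : Type} [BEq K] (f : PVT → K) (pre : List PVT) :
    pvDictK f pre = (pre.map f).foldl (fun d x => d.insert x (d.getD x 0 + 1)) PySem.Dict.empty := by
  rw [pvDictK, List.foldl_map]

lemma pvCount_map_eq {K : Type} [BEq K] [LawfulBEq K] [DecidableEq K] (f : PVT → K) (l : List PVT) (x : PVT) :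
    (l.map f).count (f x) = l.countP (fun y => decide (f y = f x)) := by
  induction l with
  | nil => simp
  | cons y t ih =>
    simp only [List.map_cons, List.count_cons, List.countP_cons, ih]
    by_cases h : f y = f x <;> simp [h]

lemma pvDictK_getD {K : Type} [BEq K] [LawfulBEq K] [DecidableEq K] (f : PVT → K) (pre : List PVT) (x : PVT) :
    (pvDictK f pre).getD (f x) 0 = ((pre.countP (fun y => decide (f y = f x)) : Nat) : Int) := by
  rw [pvDictK_eq, PySem.Dict.getD_foldl_insert_add_one, pvCount_map_eq]
  simp

lemma pvDictK_append {K : Type} [BEq K] (f : PVT → K) (pre : List PVT) (e : PVT) :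
    pvDictK f (pre ++ [e])
      = (pvDictK f pre).insert (f e) ((pvDictK f pre).getD (f e) 0 + 1) := by
  rw [pvDictK, List.foldl_append]
  rfl

lemma pvPcnt_append {K : Type} [DecidableEq K] (f : PVT → K) (p : List PVT) (x : PVT) :
    pvPcnt f (p ++ [x]) = pvPcnt f p + ((p.countP (fun y => decide (f y = f x)) : Nat) : Int) := by
  induction p with
  | nil => simp [pvPcnt_cons, pvPcnt_nil]
  | cons y p' ih =>
    simp only [List.cons_append, pvPcnt_cons, List.countP_append, List.countP_cons,
      List.countP_nil, ih]
    by_cases h : f y = f x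
    · simp [h]; ring
    · have h' : ¬ (f x = f y) := fun hh => h hh.symm
      simp [h, h']; ring

lemma pvTp_append (p : List PVT) (x : PVT) :
    pvTp (p ++ [x]) = pvTp p + ((p.length : Nat) : Int) := by
  induction p with
  | nil => simp [pvTp_cons, pvTp_nil]
  | cons y p' ih =>
    simp only [List.cons_append, pvTp_cons, ih, List.length_append, List.length_cons,
      List.length_nil]
    push_cast
    ring

def pvStateB (pre : List PVT) : PVStB :=
  (pvDictK pvKa pre, pvDictK pvKb pre, pvDictK (fun e => e) pre,
   pvLs pre, pvRs pre, pvTp pre, ((pre.length : Nat) : Int))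

lemma stepB_state (pre : List PVT) (e : PVT) :
    stepB (pvStateB pre) e = pvStateB (pre ++ [e]) := by
  obtain ⟨a, b, c⟩ := e
  have hka : pvKa (a, b, c) = (a, c) := rfl
  have hkb : pvKb (a, b, c) = (b, c) := rfl
  have h1 := pvDictK_getD pvKa pre (a, b, c)
  have h2 := pvDictK_getD pvKb pre (a, b, c)
  have h3 := pvDictK_getD (fun e => e) pre (a, b, c)
  simp only [hka] at h1
  simp only [hkb] at h2
  simp only [] at h3
  simp only [stepB, pvStateB, Prod.mk.injEq]
  refine ⟨?_, ?_, ?_, ?_, ?_, ?_, ?_⟩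
  · rw [pvDictK_append]
    rfl
  · rw [pvDictK_append]
    rfl
  · rw [pvDictK_append]
  · rw [pvLs, pvLs, pvPcnt_append, pvPcnt_append]
    simp only [hka]
    rw [h1, h3]
    ring
  · rw [pvRs, pvRs, pvPcnt_append, pvPcnt_append]
    simp only [hkb]
    rw [h2, h3]
    ring
  · rw [pvTp_append]
  · simp only [List.length_append, List.length_cons, List.length_nil]
    push_cast
    ring

lemma loopB (rest : List PVT) :
    ∀ pre : List PVT, rest.foldl stepB (pvStateB pre) = pvStateB (pre ++ rest) := by
  induction rest with
  | nil => intro pre; simp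
  | cons e rest' ih =>
    intro pre
    rw [List.foldl_cons, stepB_state, ih]
    congr 1
    simp

lemma pairCountsB_spec (ets : List PVT) :
    pairCountsB ets = (pvLs ets, pvRs ets, pvTp ets) := by
  have h0 : ((PySem.Dict.empty : PySem.Dict (Int × Int) Int),
      (PySem.Dict.empty : PySem.Dict (Int × Int) Int),
      (PySem.Dict.empty : PySem.Dict PVT Int), (0:Int), (0:Int), (0:Int), (0:Int)) = pvStateB [] := by
    simp [pvStateB, pvDictK, pvLs, pvRs, pvPcnt_nil, pvTp_nil]
  rw [pairCountsB, h0, loopB]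
  simp [pvStateB]

lemma stepAltB_spec (st : Int × Int × Int × Int × Int × Int) (z : List PVT × List PVT) :
    stepAltB st z =
      (st.1 + pvLs z.1, st.2.1 + pvRs z.1, st.2.2.1 + pvOs z.1,
       st.2.2.2.1 + pvLs (pvKept z.1 z.2), st.2.2.2.2.1 + pvRs (pvKept z.1 z.2),
       st.2.2.2.2.2 + pvOs (pvKept z.1 z.2)) := by
  obtain ⟨nl, nr, no, cl, cr, co⟩ := st
  have hkept : z.1.filter (fun e => decide (e ∈ PySem.Set.ofList z.2)) = pvKept z.1 z.2 := by
    rw [pvKept]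
    apply List.filter_congr
    intro e _
    simp [pvMemF, PySem.Set.mem_ofList]
  simp only [stepAltB, hkept, pairCountsB_spec, pvOs]

lemma outerB_spec (zs : List (List PVT × List PVT)) :
    ∀ nl nr no cl cr co : Int,
    zs.foldl stepAltB (nl, nr, no, cl, cr, co) =
      (nl + (pvSum zs).2.1, nr + (pvSum zs).2.2.1, no + (pvSum zs).2.2.2.1,
       cl + (pvSum zs).2.2.2.2.1, cr + (pvSum zs).2.2.2.2.2.1, co + (pvSum zs).2.2.2.2.2.2) := by
  induction zs with
  | nil => intro nl nr no cl cr co; simp [pvSum]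
  | cons z zs ih =>
    intro nl nr no cl cr co
    rw [List.foldl_cons, stepAltB_spec]
    simp only
    rw [ih]
    simp only [pvSum, Prod.mk.injEq]
    refine ⟨by ring, by ring, by ring, by ring, by ring, by ring⟩

-- ===== VERDICT (by name: the statement is the Claim_ definition above) =====
theorem detail_count_overlap_spec : Claim_equal_detail_count_overlap := by
  unfold Claim_equal_detail_count_overlap
  intro g p _
  unfold Spec_detail_count_overlap
  rw [detail_count_overlap, detail_count_overlap_alt]
  rw [outerA_spec, outerB_spec]
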